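-- pv_equiv track=rewrite | github.com/christianrosdahl/aoc2024 | day15.py | parse_map2
-- ===== SOURCE A (Python) =====
-- def parse_map2(map_data):
--     robot_pos = None
--     boxes = []
--     walls = []
--     for row, line in enumerate(map_data):
--         for col, symbol in enumerate(line):
--             if symbol == "#":
--                 walls.append((row, 2 * col))
--                 walls.append((row, 2 * col + 1))
--             elif symbol == "O":
--                 boxes.append((row, 2 * col))
--             elif symbol == "@":
--                 robot_pos = (row, 2 * col)
--     return robot_pos, boxes, walls
-- ===== SOURCE B (Python) =====
-- def parse_map2(map_data):
--     cells = [(row, col, s)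
--              for row, line in enumerate(map_data)
--              for col, s in enumerate(line)]
--     walls = [c for row, col, s in cells if s == "#"
--              for c in ((row, 2 * col), (row, 2 * col + 1))]
--     boxes = [(row, 2 * col) for row, col, s in cells if s == "O"]
--     robots = [(row, 2 * col) for row, col, s in cells if s == "@"]
--     robot_pos = robots[-1] if robots else None
--     return robot_pos, boxes, walls
-- ===== Notes on version B (the rewrite author's own statement) =====
-- stated objective: alternative
-- what changed: One dispatch loop threading three mutable accumulators is replaced by a flattened cell list queried by three independent selections (walls, boxes, robot markers), the robot being the last marker found.
import Mathlib
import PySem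

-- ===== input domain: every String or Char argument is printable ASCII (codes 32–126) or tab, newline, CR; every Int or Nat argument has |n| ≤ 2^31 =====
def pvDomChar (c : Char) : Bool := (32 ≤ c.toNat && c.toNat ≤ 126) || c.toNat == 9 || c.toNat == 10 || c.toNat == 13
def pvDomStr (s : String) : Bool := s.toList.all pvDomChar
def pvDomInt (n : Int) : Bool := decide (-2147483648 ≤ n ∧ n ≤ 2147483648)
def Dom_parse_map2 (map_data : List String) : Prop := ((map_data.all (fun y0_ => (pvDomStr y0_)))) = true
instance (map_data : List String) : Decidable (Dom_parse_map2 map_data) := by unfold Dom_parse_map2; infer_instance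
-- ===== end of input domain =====

-- B replaces A's single dispatch loop over three mutable accumulators by a flattened
-- cell list queried by three independent selections; same cost, different decomposition.

-- ===== PORT A =====
-- A's single pass: one fold over enumerated rows/columns carrying (robot, boxes, walls).
def parseStepA (row : Int) (st : (Option (Int × Int)) × (List (Int × Int)) × (List (Int × Int)))
    (cs : Int × Char) : (Option (Int × Int)) × (List (Int × Int)) × (List (Int × Int)) :=
  if cs.2 = '#' then (st.1, st.2.1, st.2.2 ++ [(row, 2 * cs.1), (row, 2 * cs.1 + 1)])
  else if cs.2 = 'O' then (st.1, st.2.1 ++ [(row, 2 * cs.1)], st.2.2)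
  else if cs.2 = '@' then (some (row, 2 * cs.1), st.2.1, st.2.2)
  else st

def parse_map2 (map_data : List String) : (Option (Int × Int)) × (List (Int × Int)) × (List (Int × Int)) :=
  (PySem.List.enumerate map_data).foldl
    (fun st rl => (PySem.List.enumerate rl.2.toList).foldl (parseStepA rl.1) st)
    (none, [], [])

-- ===== PORT B =====
-- B: one flattened cell list, then three independent selections over it
-- (robots[-1] if robots else None is getLast?).
def parse_map2_alt (map_data : List String) : (Option (Int × Int)) × (List (Int × Int)) × (List (Int × Int)) :=
  let cells := (PySem.List.enumerate map_data).flatMap (fun rl =>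
    (PySem.List.enumerate rl.2.toList).map (fun cs => (rl.1, cs.1, cs.2)))
  let walls := cells.flatMap (fun t =>
    if t.2.2 = '#' then [(t.1, 2 * t.2.1), (t.1, 2 * t.2.1 + 1)] else [])
  let boxes := cells.filterMap (fun t =>
    if t.2.2 = 'O' then some (t.1, 2 * t.2.1) else none)
  let robots := cells.filterMap (fun t =>
    if t.2.2 = '@' then some (t.1, 2 * t.2.1) else none)
  let robot_pos := robots.getLast?
  (robot_pos, boxes, walls)

-- ===== PRECONDITION & SPEC =====
def Spec_parse_map2 (map_data : List String) (out : (Option (Int × Int)) × (List (Int × Int)) × (List (Int × Int))) : Prop := out = parse_map2_alt map_data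
instance (map_data : List String) (out : (Option (Int × Int)) × (List (Int × Int)) × (List (Int × Int))) : Decidable (Spec_parse_map2 map_data out) := by unfold Spec_parse_map2; infer_instance

-- ===== CLAIM (what is proved, stated in full; the proofs are below) =====
def Claim_equal_parse_map2 : Prop := ∀ (map_data : List String), Dom_parse_map2 map_data → Spec_parse_map2 map_data (parse_map2 map_data)

-- ===== LEMMAS AND PROOFS =====

-- per-cell extractor functions used to characterise A's fold
def robotF (row : Int) (cs : Int × Char) : Option (Int × Int) :=
  if cs.2 = '@' then some (row, 2 * cs.1) else none
def boxF (row : Int) (cs : Int × Char) : Option (Int × Int) :=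
  if cs.2 = 'O' then some (row, 2 * cs.1) else none
def wallF (row : Int) (cs : Int × Char) : List (Int × Int) :=
  if cs.2 = '#' then [(row, 2 * cs.1), (row, 2 * cs.1 + 1)] else []

-- inner fold over a line's cells
theorem inner_fold (row : Int) (ps : List (Int × Char)) (r : Option (Int × Int))
    (b w : List (Int × Int)) :
    ps.foldl (parseStepA row) (r, b, w) =
      ((ps.reverse.findSome? (robotF row)).or r,
       b ++ ps.filterMap (boxF row),
       w ++ ps.flatMap (wallF row)) := by
  induction ps generalizing r b w with
  | nil => simp
  | cons p ps ih =>
    simp only [List.foldl_cons, List.reverse_cons, List.findSome?_append,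
      List.filterMap_cons, List.flatMap_cons]
    by_cases h1 : p.2 = '#'
    · simp [parseStepA, robotF, boxF, wallF, h1, ih]
    · by_cases h2 : p.2 = 'O'
      · simp [parseStepA, robotF, boxF, wallF, h2, ih]
      · by_cases h3 : p.2 = '@'
        · simp [parseStepA, robotF, boxF, wallF, h3, ih]
        · simp [parseStepA, robotF, boxF, wallF, h1, h2, h3, ih]

-- outer fold over the enumerated lines
theorem outer_fold (L : List (Int × String)) (r : Option (Int × Int))
    (b w : List (Int × Int)) :
    L.foldl (fun st rl => (PySem.List.enumerate rl.2.toList).foldl (parseStepA rl.1) st) (r, b, w) =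
      ((L.reverse.findSome? (fun rl =>
          (PySem.List.enumerate rl.2.toList).reverse.findSome? (robotF rl.1))).or r,
       b ++ L.flatMap (fun rl => (PySem.List.enumerate rl.2.toList).filterMap (boxF rl.1)),
       w ++ L.flatMap (fun rl => (PySem.List.enumerate rl.2.toList).flatMap (wallF rl.1))) := by
  induction L generalizing r b w with
  | nil => simp
  | cons rl L ih =>
    simp only [List.foldl_cons, List.reverse_cons, List.findSome?_append, List.flatMap_cons]
    rw [inner_fold, ih]
    simp [Option.or_assoc]

-- findSome? distributes over flatMap
theorem findSome?_flatMap {α β γ : Type} (l : List α) (f : α → List β) (g : β → Option γ) :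
    (l.flatMap f).findSome? g = l.findSome? (fun x => (f x).findSome? g) := by
  induction l with
  | nil => rfl
  | cons a l ih =>
    simp only [List.flatMap_cons, List.findSome?_append, ih, List.findSome?_cons]
    cases (f a).findSome? g <;> rfl

-- the last kept element of a filterMap is the first hit of a backwards search
theorem getLast?_filterMap {α β : Type} (l : List α) (f : α → Option β) :
    (l.filterMap f).getLast? = l.reverse.findSome? f := by
  rw [List.getLast?_eq_head?_reverse, ← List.filterMap_reverse, List.head?_filterMap]

-- A's nested backwards robot search equals B's last kept robot marker
theorem robot_eq (map_data : List String) :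
    ((PySem.List.enumerate map_data).reverse.findSome? (fun rl =>
        (PySem.List.enumerate rl.2.toList).reverse.findSome? (robotF rl.1))) =
    (((PySem.List.enumerate map_data).flatMap (fun rl =>
        (PySem.List.enumerate rl.2.toList).map (fun cs => (rl.1, cs.1, cs.2)))).filterMap
      (fun t => if t.2.2 = '@' then some (t.1, 2 * t.2.1) else none)).getLast? := by
  rw [getLast?_filterMap, List.reverse_flatMap, findSome?_flatMap]
  congr 1
  funext rl
  show _ = ((PySem.List.enumerate rl.2.toList).map (fun cs => (rl.1, cs.1, cs.2))).reverse.findSome? _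
  rw [← List.map_reverse, List.findSome?_map]
  rfl

-- ===== VERDICT (by name: the statement is the Claim_ definition above) =====
theorem parse_map2_spec : Claim_equal_parse_map2 := by
  intro map_data _
  show parse_map2 map_data = parse_map2_alt map_data
  unfold parse_map2 parse_map2_alt
  rw [outer_fold, robot_eq map_data]
  simp only [Option.or_none, List.nil_append, List.filterMap_flatMap, List.flatMap_assoc,
    List.filterMap_map, List.flatMap_map]
  rfl
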